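-- pv_equiv track=rewrite | github.com/KarthikKrishnaD/Rainfall-analysis | distribution_fitting.py | alternating_block_method
-- ===== SOURCE A (Python) =====
-- def alternating_block_method(values):
--     n = len(values)
--     hyetograph = [0] * n
--
--     # Center index
--     center = n // 2
--
--     # Split the values into alternating blocks
--     left, right = center - 1, center + 1
--     hyetograph[center] = values[0]
--
--     for i in range(1, n):
--         if i % 2 != 0:  # Alternate placing on left and right
--             hyetograph[left] = values[i]
--             left -= 1
--         else:
--             hyetograph[right] = values[i]
--             right += 1
--
--     return hyetograph
-- ===== SOURCE B (Python) =====
-- def alternating_block_method(values):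
--     left = values[1::2]       # elements placed to the left of center, in placement order
--     right = values[2::2]      # elements placed to the right of center
--     return left[::-1] + [values[0]] + right
-- ===== Notes on version B (the rewrite author's own statement) =====
-- stated objective: simpler
-- what changed: Replaces the index-juggling loop that writes into a preallocated array with three slice expressions: reversed odd-index slice, the first element, then the even-index slice, concatenated.
import Mathlib
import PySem

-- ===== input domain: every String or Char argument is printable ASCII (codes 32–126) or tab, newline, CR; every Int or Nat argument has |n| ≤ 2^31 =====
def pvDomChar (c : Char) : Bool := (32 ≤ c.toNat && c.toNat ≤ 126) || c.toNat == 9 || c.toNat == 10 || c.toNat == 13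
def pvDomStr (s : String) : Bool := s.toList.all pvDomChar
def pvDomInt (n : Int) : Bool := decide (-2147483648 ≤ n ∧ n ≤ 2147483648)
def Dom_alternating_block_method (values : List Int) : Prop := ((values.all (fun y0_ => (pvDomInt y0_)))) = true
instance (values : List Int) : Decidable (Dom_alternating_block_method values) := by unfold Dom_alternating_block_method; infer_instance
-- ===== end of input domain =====

-- B replaces A's index-juggling loop over a preallocated array with three slices
-- (reversed odd-index slice, first element, even-index slice) concatenated; objective: simpler.

-- ===== PORT A =====
def alternating_block_method (values : List Int) : List Int :=
  let n : Int := (values.length : Int)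
  let center : Int := PySem.Int.floordiv n 2
  -- hyetograph = [0] * n; hyetograph[center] = values[0]  (values[0] raises on empty: Pre_)
  let h0 : List Int :=
    PySem.List.pySetD (List.replicate values.length (0 : Int)) center
      (PySem.List.pyGetD values 0 0)
  -- for i in range(1, n): alternate writes at left (descending) / right (ascending)
  let st :=
    (PySem.List.pyRange 1 n).foldl
      (fun (s : List Int × Int × Int) i =>
        if PySem.Int.mod i 2 ≠ 0 then
          (PySem.List.pySetD s.1 s.2.1 (PySem.List.pyGetD values i 0), s.2.1 - 1, s.2.2)
        else
          (PySem.List.pySetD s.1 s.2.2 (PySem.List.pyGetD values i 0), s.2.1, s.2.2 + 1))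
      (h0, center - 1, center + 1)
  st.1

-- ===== PORT B =====
def alternating_block_method_alt (values : List Int) : List Int :=
  let left := (PySem.List.slice? values (some 1) none 2).getD []   -- values[1::2]
  let right := (PySem.List.slice? values (some 2) none 2).getD []  -- values[2::2]
  (PySem.List.slice? left none none (-1)).getD []                  -- left[::-1]
    ++ [PySem.List.pyGetD values 0 0] ++ right                     -- + [values[0]] + right

-- ===== PRECONDITION & SPEC =====
-- Python A raises IndexError on the empty list (values[0]); B raises there too.
def Pre_alternating_block_method (values : List Int) : Prop := values ≠ []
instance (values : List Int) : Decidable (Pre_alternating_block_method values) := by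
  unfold Pre_alternating_block_method; infer_instance
def pvWitness_alternating_block_method : List Int := [5, 3, 1, 2, 4]

def Spec_alternating_block_method (values : List Int) (out : List Int) : Prop :=
  out = alternating_block_method_alt values
instance (values : List Int) (out : List Int) : Decidable (Spec_alternating_block_method values out) := by
  unfold Spec_alternating_block_method; infer_instance

-- ===== CLAIM (what is proved, stated in full; the proofs are below) =====
def Claim_equal_alternating_block_method : Prop :=
  ∀ (values : List Int), Dom_alternating_block_method values →
    Pre_alternating_block_method values →
    Spec_alternating_block_method values (alternating_block_method values)

-- ===== LEMMAS AND PROOFS =====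

-- filterMap whose function is total on the list is a map
lemma pvFilterMap_eq_map {α β : Type} (l : List α) (f : α → Option β) (g : α → β)
    (h : ∀ x ∈ l, f x = some (g x)) : l.filterMap f = l.map g := by
  induction l with
  | nil => simp
  | cons a t ih =>
    have hf := h a (by simp)
    rw [List.filterMap_cons, hf, List.map_cons]
    exact congrArg (g a :: ·) (ih fun x hx => h x (by simp [hx]))

-- xs[a::2] for a natural start: every second element from index a
lemma pvSlice2 (L : List Int) (a : Nat) :
    PySem.List.slice? L (some (a : Int)) none 2
      = some ((List.range ((L.length - a + 1) / 2)).map (fun j => L.getD (a + 2 * j) 0)) := by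
  have ha : ¬ ((a : Int) < 0) := by omega
  simp only [PySem.List.slice?, PySem.List.sliceIndices]
  norm_num [ha]
  by_cases hcase : a < L.length
  · have hmin : min (a : Int) (L.length : Int) = (a : Int) :=
      min_eq_left (by exact_mod_cast hcase.le)
    rw [hmin, if_pos hcase,
      show (((L.length : Int) - (a : Int) + 2 - 1) / 2).toNat = (L.length - a + 1) / 2 from by
        omega]
    refine pvFilterMap_eq_map _ _ _ ?_
    intro x hx
    rw [List.mem_range] at hx
    have hlt : a + 2 * x < L.length := by omega
    rw [show ((a : Int) + 2 * (x : Int)).toNat = a + 2 * x from by omega]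
    simp [List.getD_eq_getElem?_getD, List.getElem?_eq_getElem hlt]
  · have hmin : min (a : Int) (L.length : Int) = (L.length : Int) :=
      min_eq_right (by exact_mod_cast Nat.le_of_not_lt hcase)
    rw [hmin, if_neg hcase,
      show (L.length - a + 1) / 2 = 0 from by omega]
    simp

lemma pvSlice2_one (L : List Int) :
    PySem.List.slice? L (some 1) none 2
      = some ((List.range (L.length / 2)).map (fun j => L.getD (1 + 2 * j) 0)) := by
  have h := pvSlice2 L 1
  norm_num at h
  rw [h, show (L.length - 1 + 1) / 2 = L.length / 2 from by omega]
  simp [List.getD_eq_getElem?_getD]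

lemma pvSlice2_two (L : List Int) :
    PySem.List.slice? L (some 2) none 2
      = some ((List.range ((L.length - 1) / 2)).map (fun j => L.getD (2 + 2 * j) 0)) := by
  have h := pvSlice2 L 2
  norm_num at h
  rw [h, show (L.length - 2 + 1) / 2 = (L.length - 1) / 2 from by omega]
  simp [List.getD_eq_getElem?_getD]

-- set past a prefix
lemma pvSet_append_right (l1 l2 : List Int) (m : Nat) (v : Int) (h : l1.length ≤ m) :
    (l1 ++ l2).set m v = l1 ++ l2.set (m - l1.length) v := by
  rw [List.set_append, if_neg (by omega)]

-- set the last cell of a replicate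
lemma pvSet_replicate_last (m m' : Nat) (v : Int) (h : m' = m + 1) :
    (List.replicate m' (0 : Int)).set m v = List.replicate m (0 : Int) ++ [v] := by
  subst h
  induction m with
  | zero => simp
  | succ m ih =>
    rw [List.replicate_succ, List.set_cons_succ, ih, List.replicate_succ]
    simp

-- set inside a replicate, splitting it
lemma pvReplicate_set (n c : Nat) (v : Int) (h : c < n) :
    (List.replicate n (0 : Int)).set c v
      = List.replicate c (0 : Int) ++ v :: List.replicate (n - 1 - c) (0 : Int) := by
  obtain ⟨t, rfl⟩ : ∃ t, n = c + (t + 1) := ⟨n - c - 1, by omega⟩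
  rw [List.replicate_add, pvSet_append_right _ _ _ _ (by simp), List.length_replicate,
    Nat.sub_self, List.replicate_succ, List.set_cons_zero,
    show c + (t + 1) - 1 - c = t from by omega]

lemma pvMod_two (a : Int) : PySem.Int.mod a 2 = a % 2 := by
  show Int.fmod a 2 = a % 2
  rw [Int.fmod_eq_emod, if_pos (Or.inl (by norm_num))]
  omega

lemma pvFloordiv_two (n : Nat) : PySem.Int.floordiv (n : Int) 2 = ((n / 2 : Nat) : Int) := by
  show Int.fdiv (n : Int) 2 = ((n / 2 : Nat) : Int)
  rw [Int.fdiv_eq_ediv, if_pos (Or.inl (by norm_num))]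
  omega

-- the loop invariant of A: after range(1, k+1) the array is
-- zeros ++ (odd-index values so far, reversed) ++ v0 ++ (even-index values so far) ++ zeros
set_option maxHeartbeats 1000000 in
lemma pvLoopInv (L : List Int) (v0 : Int) (hL : 1 ≤ L.length) (k : Nat)
    (hk : k ≤ L.length - 1) :
    (PySem.List.pyRange 1 ((k : Int) + 1)).foldl
      (fun (s : List Int × Int × Int) i =>
        if PySem.Int.mod i 2 ≠ 0 then
          (PySem.List.pySetD s.1 s.2.1 (PySem.List.pyGetD L i 0), s.2.1 - 1, s.2.2)
        else
          (PySem.List.pySetD s.1 s.2.2 (PySem.List.pyGetD L i 0), s.2.1, s.2.2 + 1))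
      ((List.replicate L.length (0 : Int)).set (L.length / 2) v0,
        ((L.length / 2 : Nat) : Int) - 1, ((L.length / 2 : Nat) : Int) + 1)
    = (List.replicate (L.length / 2 - (k + 1) / 2) (0 : Int)
        ++ (((List.range ((k + 1) / 2)).map (fun j => L.getD (1 + 2 * j) 0)).reverse
        ++ v0 :: ((List.range (k / 2)).map (fun j => L.getD (2 + 2 * j) 0)
        ++ List.replicate (L.length - 1 - L.length / 2 - k / 2) (0 : Int))),
        ((L.length / 2 : Nat) : Int) - 1 - (((k + 1) / 2 : Nat) : Int),
        ((L.length / 2 : Nat) : Int) + 1 + ((k / 2 : Nat) : Int)) := by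
  induction k with
  | zero =>
    rw [PySem.List.pyRange_one_eq_nil (by norm_num), List.foldl_nil,
      pvReplicate_set L.length (L.length / 2) v0 (by omega)]
    simp
  | succ k ih =>
    have hk' : k ≤ L.length - 1 := by omega
    have hsplit : PySem.List.pyRange 1 ((k : Int) + 1 + 1)
        = PySem.List.pyRange 1 ((k : Int) + 1) ++ [(k : Int) + 1] :=
      PySem.List.pyRange_one_succ_right (by omega)
    have hget : PySem.List.pyGetD L ((k : Int) + 1) 0 = L.getD (k + 1) 0 := by
      rw [show ((k : Int) + 1) = ((k + 1 : Nat) : Int) from by push_cast; ring,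
        PySem.List.pyGetD_natCast]
    rw [show (((k + 1 : Nat) : Int) + 1) = ((k : Int) + 1 + 1) from by push_cast; ring,
      hsplit, List.foldl_append, ih hk']
    simp only [List.foldl_cons, List.foldl_nil]
    rcases Nat.even_or_odd k with ⟨m, hm⟩ | ⟨m, hm⟩
    · -- k = m + m even, so i = k + 1 is odd: write at left = center - 1 - m
      subst hm
      have hparity : PySem.Int.mod (((m + m : Nat) : Int) + 1) 2 ≠ 0 := by
        rw [pvMod_two]; omega
      have hmc : m + 1 ≤ L.length / 2 := by omega
      have hom : (m + m + 1) / 2 = m := by omega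
      have hom2 : (m + m) / 2 = m := by omega
      have hom3 : (m + m + 1 + 1) / 2 = m + 1 := by omega
      have hv : L.getD (m + m + 1) 0 = L.getD (1 + 2 * m) 0 := by
        rw [show m + m + 1 = 1 + 2 * m from by omega]
      rw [if_pos hparity]
      simp only [hom, hom2, hom3, hget, hv]
      rw [show ((L.length / 2 : Nat) : Int) - 1 - ((m : Nat) : Int)
          = ((L.length / 2 - 1 - m : Nat) : Int) from by omega,
        PySem.List.pySetD_natCast, List.set_append, if_pos (by simp only [List.length_replicate]; omega),
        pvSet_replicate_last (L.length / 2 - 1 - m) (L.length / 2 - m) _ (by omega),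
        List.range_succ]
      simp only [List.map_append, List.map_cons, List.map_nil, List.reverse_append,
        List.reverse_cons, List.reverse_nil, List.nil_append, List.append_assoc,
        List.cons_append, List.singleton_append, Prod.mk.injEq]
      refine ⟨?_, by omega, trivial⟩
      rw [show L.length / 2 - (m + 1) = L.length / 2 - 1 - m from by omega]
    · -- k = 2m + 1 odd, so i = k + 1 is even: write at right = center + 1 + m
      subst hm
      have hparity : ¬ PySem.Int.mod (((2 * m + 1 : Nat) : Int) + 1) 2 ≠ 0 := by
        rw [pvMod_two]; omega
      have hmc : m + 1 ≤ L.length / 2 := by omega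
      have hme : m + 1 ≤ L.length - 1 - L.length / 2 := by omega
      have hom : (2 * m + 1 + 1) / 2 = m + 1 := by omega
      have hom2 : (2 * m + 1) / 2 = m := by omega
      have hom3 : (2 * m + 1 + 1 + 1) / 2 = m + 1 := by omega
      have hv : L.getD (2 * m + 1 + 1) 0 = L.getD (2 + 2 * m) 0 := by
        rw [show 2 * m + 1 + 1 = 2 + 2 * m from by omega]
      rw [if_neg hparity]
      simp only [hom, hom2, hom3, hget, hv]
      rw [show ((L.length / 2 : Nat) : Int) + 1 + ((m : Nat) : Int)
          = ((L.length / 2 + 1 + m : Nat) : Int) from by push_cast; ring,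
        PySem.List.pySetD_natCast,
        pvSet_append_right _ _ _ _ (by simp only [List.length_replicate]; omega),
        pvSet_append_right _ _ _ _
          (by simp only [List.length_replicate, List.length_reverse, List.length_map, List.length_range]; omega)]
      simp only [List.length_replicate, List.length_reverse, List.length_map,
        List.length_range]
      rw [show L.length / 2 + 1 + m - (L.length / 2 - (m + 1)) - (m + 1) = m + 1 from by
          omega,
        List.set_cons_succ,
        pvSet_append_right _ _ _ _ (by simp only [List.length_map, List.length_range]; omega)]
      simp only [List.length_map, List.length_range]
      rw [Nat.sub_self,
        show L.length - 1 - L.length / 2 - m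
          = (L.length - 1 - L.length / 2 - (m + 1)) + 1 from by omega,
        List.replicate_succ, List.set_cons_zero, List.range_succ]
      simp only [List.map_append, List.map_cons, List.map_nil, List.append_assoc,
        List.cons_append, List.singleton_append, List.nil_append, Prod.mk.injEq]
      exact ⟨trivial, trivial, by omega⟩

-- ===== VERDICT (by name: the statement is the Claim_ definition above) =====
set_option maxHeartbeats 1000000 in
theorem alternating_block_method_spec : Claim_equal_alternating_block_method := by
  intro L _ hpre
  unfold Spec_alternating_block_method
  have hL : 1 ≤ L.length := List.length_pos_of_ne_nil hpre
  simp only [alternating_block_method, alternating_block_method_alt,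
    pvFloordiv_two, PySem.List.pySetD_natCast,
    pvSlice2_one, pvSlice2_two, PySem.List.slice?_none_none_neg_one, Option.getD_some]
  rw [show ((L.length : Nat) : Int) = (((L.length - 1 : Nat) : Int) + 1) from by omega,
    pvLoopInv L (PySem.List.pyGetD L 0 0) hL (L.length - 1) le_rfl,
    show (L.length - 1 + 1) / 2 = L.length / 2 from by omega,
    show L.length / 2 - L.length / 2 = 0 from by omega,
    show (L.length - 1) / 2 = L.length - 1 - L.length / 2 from by omega,
    show L.length - 1 - L.length / 2 - (L.length - 1 - L.length / 2) = 0 from by omega]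
  simp
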